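-- pv_equiv track=rewrite | github.com/hoangdinhtran1995/DP_practice | phonenr_wordsearch.py | phonenr_wordsearch
-- ===== SOURCE A (Python) =====
-- def phonenr_wordsearch(numberstr, words):
--     # convert words into numberstrings
--     interpretor = [2,2,2,3,3,3,4,4,4,5,5,5,6,6,6,7,7,7,7,8,8,8,9,9,9,9]
--     output_list = []
--     for word in words:
--         word2nums = ''
--         for i in range(len(word)):
--             word2nums += str(interpretor[ord(word[i])-97])
--         if word2nums in numberstr:
--             output_list.append(word)
--     return output_list
-- ===== SOURCE B (Python) =====
-- def phonenr_wordsearch(numberstr, words):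
--     # Index numberstr once: collect every substring whose length is the length of
--     # some word, into a set; then filter words by one O(1) lookup each.
--     digit = dict(zip("abcdefghijklmnopqrstuvwxyz", "22233344455566677778889999"))
--     encs = ["".join(digit[c] for c in w) for w in words]
--     n = len(numberstr)
--     subs = set()
--     for L in set(len(e) for e in encs):
--         for i in range(n - L + 1):
--             subs.add(numberstr[i:i + L])
--     return [w for w, e in zip(words, encs) if e in subs]
-- ===== Notes on version B (the rewrite author's own statement) =====
-- stated objective: faster
-- what changed: Instead of scanning numberstr once per word (Python 'in' per word), B indexes numberstr once into a set of all its substrings whose length is some word length, then filters the words with one O(1) set lookup each.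
-- outside the precondition, e.g. on phonenr_wordsearch('2', ['G']): A returns ['G'], B raises KeyError
import Mathlib
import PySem

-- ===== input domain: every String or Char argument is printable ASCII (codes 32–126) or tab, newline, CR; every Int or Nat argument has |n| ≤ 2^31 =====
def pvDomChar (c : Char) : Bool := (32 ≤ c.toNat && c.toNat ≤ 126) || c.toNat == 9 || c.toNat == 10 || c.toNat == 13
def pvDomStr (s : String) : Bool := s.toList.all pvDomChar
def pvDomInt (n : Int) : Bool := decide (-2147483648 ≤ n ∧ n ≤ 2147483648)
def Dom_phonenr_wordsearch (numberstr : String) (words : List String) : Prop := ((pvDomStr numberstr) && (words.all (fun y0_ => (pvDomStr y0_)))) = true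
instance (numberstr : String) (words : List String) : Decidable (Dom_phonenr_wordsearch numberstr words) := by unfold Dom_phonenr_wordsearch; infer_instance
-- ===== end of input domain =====

-- B indexes numberstr once (a set of all substrings of the needed lengths) instead of
-- scanning numberstr per word; equivalence is about the return value only.

-- ===== PORT A =====
def pvInterpretor : List Int := [2,2,2,3,3,3,4,4,4,5,5,5,6,6,6,7,7,7,7,8,8,8,9,9,9,9]

def phonenr_wordsearch (numberstr : String) (words : List String) : List String :=
  words.foldl (fun output_list word =>
    -- word2nums built by 'for i in range(len(word)): word2nums += str(interpretor[ord(word[i])-97])';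
    -- interpretor[...] ports as pyGet? (Python's negative-index rule); Pre_ excludes the none case (IndexError)
    let word2nums : List Char :=
      (PySem.List.pyRange 0 (PySem.List.len word.toList)).foldl
        (fun acc i =>
          acc ++ PySem.Int.toChars
            ((PySem.List.pyGet? pvInterpretor
              (((PySem.List.pyGetD word.toList i ' ').toNat : Int) - 97)).getD 0))
        []
    if PySem.Chars.isIn word2nums numberstr.toList then output_list ++ [word] else output_list)
    []

-- ===== PORT B =====
def pvDigitDict : PySem.Dict Char Char :=
  PySem.Dict.ofList ("abcdefghijklmnopqrstuvwxyz".toList.zip "22233344455566677778889999".toList)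

-- digit[c] raises KeyError on a non-lowercase char; Pre_ excludes that, so the default is never read
def pvEnc (w : String) : List Char := w.toList.map (fun c => pvDigitDict.getD c ' ')

def phonenr_wordsearch_alt (numberstr : String) (words : List String) : List String :=
  let encs := words.map pvEnc
  let n : Int := PySem.List.len numberstr.toList
  let subs : PySem.Set (List Char) :=
    (PySem.Set.ofList (encs.map (fun e => (e.length : Int)))).foldl
      (fun s L =>
        (PySem.List.pyRange 0 (n - L + 1)).foldl
          (fun s i => s.add (PySem.List.slice numberstr.toList (some i) (some (i + L)))) s)
      PySem.Set.empty
  ((words.zip encs).filter (fun p => subs.contains p.2)).map Prod.fst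

-- ===== PRECONDITION & SPEC =====
-- Pre_ excludes words containing a non-lowercase character: on chars outside [chr(71)..chr(122)] A raises
-- IndexError, and on chars in [chr(71)..chr(96)] A returns a value only through Python's accidental
-- negative-index wraparound of 'interpretor[ord(c)-97]', where B's dict lookup raises KeyError.
def Pre_phonenr_wordsearch (numberstr : String) (words : List String) : Prop :=
  (words.all (fun w => w.toList.all (fun c => 97 ≤ c.toNat && c.toNat ≤ 122))) = true
instance (numberstr : String) (words : List String) : Decidable (Pre_phonenr_wordsearch numberstr words) := by
  unfold Pre_phonenr_wordsearch; infer_instance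

def pvWitness_phonenr_wordsearch : String × List String := ("2", ["a"])

def Spec_phonenr_wordsearch (numberstr : String) (words : List String) (out : List String) : Prop := out = phonenr_wordsearch_alt numberstr words
instance (numberstr : String) (words : List String) (out : List String) : Decidable (Spec_phonenr_wordsearch numberstr words out) := by unfold Spec_phonenr_wordsearch; infer_instance

-- ===== CLAIM (what is proved, stated in full; the proofs are below) =====
def Claim_equal_phonenr_wordsearch : Prop := ∀ (numberstr : String) (words : List String), Dom_phonenr_wordsearch numberstr words → Pre_phonenr_wordsearch numberstr words → Spec_phonenr_wordsearch numberstr words (phonenr_wordsearch numberstr words)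

-- ===== LEMMAS AND PROOFS =====

-- per-char: A's 'str(interpretor[ord(c)-97])' is the single char B's dict gives, for lowercase c
theorem pvCharNat (n : Nat) (h1 : 97 ≤ n) (h2 : n ≤ 122) :
    PySem.Int.toChars ((PySem.List.pyGet? pvInterpretor ((n : Int) - 97)).getD 0)
      = [pvDigitDict.getD (Char.ofNat n) ' '] := by
  interval_cases n <;> decide

theorem pvCharEq (c : Char) (h1 : 97 ≤ c.toNat) (h2 : c.toNat ≤ 122) :
    PySem.Int.toChars ((PySem.List.pyGet? pvInterpretor ((c.toNat : Int) - 97)).getD 0)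
      = [pvDigitDict.getD c ' '] := by
  have := pvCharNat c.toNat h1 h2
  rwa [Char.ofNat_toNat] at this

theorem pvFlatMapEq (cs : List Char) (h : ∀ c ∈ cs, 97 ≤ c.toNat ∧ c.toNat ≤ 122) :
    cs.flatMap (fun c =>
        PySem.Int.toChars ((PySem.List.pyGet? pvInterpretor ((c.toNat : Int) - 97)).getD 0))
      = cs.map (fun c => pvDigitDict.getD c ' ') := by
  induction cs with
  | nil => rfl
  | cons c t ih =>
      have hc := h c (List.mem_cons_self ..)
      simp only [List.flatMap_cons, List.map_cons, pvCharEq c hc.1 hc.2,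
        ih (fun x hx => h x (List.mem_cons_of_mem _ hx))]
      rfl

-- A's inner loop equals B's encoding, for a lowercase word
theorem pvEncEq (w : String) (h : ∀ c ∈ w.toList, 97 ≤ c.toNat ∧ c.toNat ≤ 122) :
    (PySem.List.pyRange 0 (PySem.List.len w.toList)).foldl
        (fun acc i =>
          acc ++ PySem.Int.toChars
            ((PySem.List.pyGet? pvInterpretor
              (((PySem.List.pyGetD w.toList i ' ').toNat : Int) - 97)).getD 0))
        []
      = pvEnc w := by
  rw [PySem.List.foldl_pyRange_pyGetD w.toList ' '
      (fun acc c => acc ++ PySem.Int.toChars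
        ((PySem.List.pyGet? pvInterpretor ((c.toNat : Int) - 97)).getD 0)) [] le_rfl]
  simp only [Int.toNat_zero, List.drop_zero]
  rw [PySem.List.foldl_append_eq_flatMap]
  simp [pvFlatMapEq w.toList h, pvEnc]

-- membership in a fold that adds (g x) for each x
theorem pvMemFoldAdd {α β : Type} [BEq α] [LawfulBEq α] (l : List β) (g : β → α)
    (s : PySem.Set α) (y : α) :
    y ∈ l.foldl (fun s x => s.add (g x)) s ↔ y ∈ s ∨ ∃ x ∈ l, g x = y := by
  induction l generalizing s with
  | nil => simp
  | cons x t ih =>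
      simp only [List.foldl_cons, ih, PySem.Set.mem_add]
      constructor
      · rintro (⟨h | h⟩ | ⟨z, hz, hgz⟩)
        · exact Or.inl h
        · exact Or.inr ⟨x, List.mem_cons_self .., h.symm⟩
        · exact Or.inr ⟨z, List.mem_cons_of_mem _ hz, hgz⟩
      · rintro (h | ⟨z, hz, hgz⟩)
        · exact Or.inl (Or.inl h)
        · rcases List.mem_cons.mp hz with rfl | hz
          · exact Or.inl (Or.inr hgz.symm)
          · exact Or.inr ⟨z, hz, hgz⟩

-- membership in the nested fold building the substring set
theorem pvMemFold2 {α β γ : Type} [BEq α] [LawfulBEq α] (l : List β) (inner : β → List γ)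
    (g : β → γ → α) (s : PySem.Set α) (y : α) :
    y ∈ l.foldl (fun s x => (inner x).foldl (fun s i => s.add (g x i)) s) s
      ↔ y ∈ s ∨ ∃ x ∈ l, ∃ i ∈ inner x, g x i = y := by
  induction l generalizing s with
  | nil => simp
  | cons x t ih =>
      simp only [List.foldl_cons, ih, pvMemFoldAdd]
      constructor
      · rintro (⟨h | ⟨i, hi, hgi⟩⟩ | ⟨z, hz, hrest⟩)
        · exact Or.inl h
        · exact Or.inr ⟨x, List.mem_cons_self .., i, hi, hgi⟩
        · exact Or.inr ⟨z, List.mem_cons_of_mem _ hz, hrest⟩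
      · rintro (h | ⟨z, hz, hrest⟩)
        · exact Or.inl (Or.inl h)
        · rcases List.mem_cons.mp hz with rfl | hz
          · exact Or.inl (Or.inr hrest)
          · exact Or.inr ⟨z, hz, hrest⟩

-- the substring set contains e iff e occurs in ns, provided e's length is one of the indexed lengths
theorem pvMemSubs (ns : List Char) (lens : List Int) (e : List Char)
    (hlen : (e.length : Int) ∈ lens) (hnn : ∀ L ∈ lens, 0 ≤ L) :
    e ∈ (PySem.Set.ofList lens).foldl
        (fun s L =>
          (PySem.List.pyRange 0 ((PySem.List.len ns) - L + 1)).foldl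
            (fun s i => s.add (PySem.List.slice ns (some i) (some (i + L)))) s)
        PySem.Set.empty
      ↔ PySem.Chars.isIn e ns = true := by
  rw [pvMemFold2]
  simp only [PySem.Set.empty, List.not_mem_nil, false_or, PySem.Set.mem_ofList]
  constructor
  · rintro ⟨L, hL, i, hi, hslice⟩
    rw [PySem.List.mem_pyRange_one] at hi
    obtain ⟨hi0, hi1⟩ := hi
    lift L to ℕ using hnn L hL with m
    lift i to ℕ using hi0 with j
    rw [PySem.List.slice_natCast_add] at hslice
    rw [← PySem.Chars.exists_prefix_drop_iff_isIn]
    exact ⟨j, hslice ▸ List.take_prefix _ _⟩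
  · intro hIn
    rw [← PySem.Chars.exists_prefix_drop_iff_isIn] at hIn
    obtain ⟨j, hj⟩ := hIn
    -- replace j by min j ns.length (if j overshoots, drop j = [] so e = [] is a prefix of anything)
    have hj' : e <+: ns.drop (min j ns.length) := by
      rcases le_total j ns.length with h | h
      · rwa [min_eq_left h]
      · have : ns.drop j = [] := List.drop_eq_nil_of_le h
        rw [this] at hj
        have he : e = [] := List.prefix_nil.mp hj
        simp [he]
    set j' := min j ns.length with hj'def
    have hjle : j' ≤ ns.length := min_le_right _ _
    have hlenle : e.length ≤ ns.length - j' := by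
      have := hj'.length_le
      simpa using this
    refine ⟨(e.length : Int), hlen, (j' : Int), ?_, ?_⟩
    · rw [PySem.List.mem_pyRange_one]
      constructor
      · exact_mod_cast Nat.zero_le _
      · simp only [PySem.List.len]
        omega
    · rw [PySem.List.slice_natCast_add]
      rw [List.prefix_iff_eq_take] at hj'
      exact hj'.symm

-- B's zip–filter–map is a plain filter over words
theorem pvAltFilter (numberstr : String) (words : List String) :
    phonenr_wordsearch_alt numberstr words
      = words.filter (fun w =>
          (PySem.Set.ofList ((words.map pvEnc).map (fun e => (e.length : Int)))).foldl
            (fun s L =>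
              (PySem.List.pyRange 0 ((PySem.List.len numberstr.toList) - L + 1)).foldl
                (fun s i => s.add (PySem.List.slice numberstr.toList (some i) (some (i + L)))) s)
            PySem.Set.empty
          |>.contains (pvEnc w)) := by
  unfold phonenr_wordsearch_alt
  have hz : ∀ (l : List String), l.zip (l.map pvEnc) = l.map (fun w => (w, pvEnc w)) := by
    intro l
    induction l with
    | nil => rfl
    | cons x t ih => simp [ih]
  simp [hz, List.filter_map, Function.comp_def]

-- ===== VERDICT (by name: the statement is the Claim_ definition above) =====
theorem phonenr_wordsearch_spec : Claim_equal_phonenr_wordsearch := by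
  intro numberstr words _hDom hPreB
  have hPre : ∀ w ∈ words, ∀ c ∈ w.toList, 97 ≤ c.toNat ∧ c.toNat ≤ 122 := by
    intro w hw c hc
    have := List.all_eq_true.mp hPreB w hw
    have := List.all_eq_true.mp this c hc
    simpa using this
  unfold Spec_phonenr_wordsearch
  rw [pvAltFilter]
  unfold phonenr_wordsearch
  rw [PySem.List.foldl_congr_mem _ _
      (fun out w => if PySem.Chars.isIn (pvEnc w) numberstr.toList then out ++ [w] else out) _
      (by
        intro acc w hw
        simp only [pvEncEq w (hPre w hw)])]
  rw [PySem.List.foldl_append_if_eq_filter]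
  rw [List.nil_append]
  refine List.filter_congr ?_
  intro w hw
  have hlen : ((pvEnc w).length : Int)
      ∈ (words.map pvEnc).map (fun e => (e.length : Int)) :=
    List.mem_map_of_mem (List.mem_map_of_mem hw)
  have hnn : ∀ L ∈ (words.map pvEnc).map (fun e => (e.length : Int)), 0 ≤ L := by
    intro L hL
    simp only [List.mem_map] at hL
    obtain ⟨e, _, rfl⟩ := hL
    exact_mod_cast Nat.zero_le _
  rw [Bool.eq_iff_iff, PySem.Set.contains_iff, pvMemSubs numberstr.toList _ _ hlen hnn]
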